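-- pv_equiv track=rewrite | github.com/xxaishs21/Cinapple | app/pages/4_Conseiller.py | films_compatibles
-- ===== SOURCE A (Python) =====
-- def films_compatibles(movies, history):
--     result = []
--
--     for movie in movies:
--         ok = True
--         for attr, val in history:
--             if movie[attr] != val:
--                 ok = False
--                 break
--         if ok:
--             result.append(movie)
--
--     return result
-- ===== SOURCE B (Python) =====
-- def films_compatibles(movies, history):
--     result = list(movies)
--     for attr, val in history:
--         result = [m for m in result if m[attr] == val]
--     return result
-- ===== Notes on version B (the rewrite author's own statement) =====
-- stated objective: alternative
-- what changed: Flipped the loop nesting: instead of testing each movie against all history constraints with an early break, B starts from a copy of movies and repeatedly narrows it with one list-comprehension filter per (attr, val) constraint.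
import Mathlib
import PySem

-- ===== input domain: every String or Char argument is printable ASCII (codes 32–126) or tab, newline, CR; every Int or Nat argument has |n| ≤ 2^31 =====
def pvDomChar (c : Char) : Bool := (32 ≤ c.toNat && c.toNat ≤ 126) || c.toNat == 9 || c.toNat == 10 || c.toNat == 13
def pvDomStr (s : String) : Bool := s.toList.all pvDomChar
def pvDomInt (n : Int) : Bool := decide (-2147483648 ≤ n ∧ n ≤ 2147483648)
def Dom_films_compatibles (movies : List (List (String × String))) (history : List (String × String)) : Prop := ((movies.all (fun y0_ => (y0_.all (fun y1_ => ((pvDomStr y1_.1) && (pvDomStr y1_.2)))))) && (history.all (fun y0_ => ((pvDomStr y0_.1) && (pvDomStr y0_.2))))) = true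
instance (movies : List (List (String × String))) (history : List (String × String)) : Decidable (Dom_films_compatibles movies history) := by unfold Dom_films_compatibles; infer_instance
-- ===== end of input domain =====

-- B flips the loop nesting (per-constraint filtering of a shrinking candidate list instead of a per-movie
-- all-constraints check with early break); alternative decomposition, same asymptotic cost.


-- ===== PORT A =====
-- inner 'for attr, val in history' loop: returns 'ok'; movie[attr] is first-match lookup (none = KeyError,
-- reached only outside Pre_)
def pvCheckA (movie : List (String × String)) : List (String × String) → Bool
  | [] => true
  | (attr, val) :: rest =>
    match movie.lookup attr with
    | none => false          -- Python raises KeyError here; excluded by Pre_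
    | some v => if v ≠ val then false else pvCheckA movie rest

def films_compatibles (movies : List (List (String × String))) (history : List (String × String)) : List (List (String × String)) :=
  movies.foldl (fun result movie => if pvCheckA movie history then result ++ [movie] else result) []

-- ===== PORT B =====
def films_compatibles_alt (movies : List (List (String × String))) (history : List (String × String)) : List (List (String × String)) :=
  history.foldl (fun result p => result.filter (fun m => m.lookup p.1 == some p.2)) movies

-- ===== PRECONDITION & SPEC =====
-- Pre_ excludes exactly the inputs on which Python A raises KeyError: some movie, at the first history
-- constraint not already failed by an earlier mismatch, lacks the constraint's key.
def Pre_films_compatibles (movies : List (List (String × String))) (history : List (String × String)) : Prop :=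
  ∀ m ∈ movies, ∀ i ∈ List.range history.length,
    ((history.take i).all (fun p => m.lookup p.1 == some p.2)) = true →
    ((m.lookup (history.getD i ("", "")).1).isSome = true)
instance (movies : List (List (String × String))) (history : List (String × String)) : Decidable (Pre_films_compatibles movies history) := by unfold Pre_films_compatibles; infer_instance

def pvWitness_films_compatibles : (List (List (String × String))) × (List (String × String)) :=
  ([[("genre", "scifi")], [("genre", "drama")]], [("genre", "scifi")])

def Spec_films_compatibles (movies : List (List (String × String))) (history : List (String × String)) (out : List (List (String × String))) : Prop := out = films_compatibles_alt movies history
instance (movies : List (List (String × String))) (history : List (String × String)) (out : List (List (String × String))) : Decidable (Spec_films_compatibles movies history out) := by unfold Spec_films_compatibles; infer_instance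

-- ===== CLAIM (what is proved, stated in full; the proofs are below) =====
def Claim_equal_films_compatibles : Prop := ∀ (movies : List (List (String × String))) (history : List (String × String)), Dom_films_compatibles movies history → Pre_films_compatibles movies history → Spec_films_compatibles movies history (films_compatibles movies history)

-- ===== LEMMAS AND PROOFS =====
lemma pvCheckA_eq_all (m : List (String × String)) (h : List (String × String)) :
    pvCheckA m h = h.all (fun p => m.lookup p.1 == some p.2) := by
  induction h with
  | nil => rfl
  | cons p rest ih =>
    obtain ⟨attr, val⟩ := p
    simp only [pvCheckA, List.all_cons]
    cases hg : m.lookup attr with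
    | none => simp
    | some v =>
      by_cases hv : v = val
      · simp [hv, ih]
      · simp [hv]

lemma foldl_filter_eq_filter_all (h : List (String × String)) (movies : List (List (String × String))) :
    h.foldl (fun result p => result.filter (fun m => m.lookup p.1 == some p.2)) movies
      = movies.filter (fun m => h.all (fun p => m.lookup p.1 == some p.2)) := by
  induction h generalizing movies with
  | nil => simp
  | cons p rest ih =>
    simp only [List.foldl_cons, ih, List.filter_filter, List.all_cons]
    congr 1
    funext m
    exact Bool.and_comm _ _

-- ===== VERDICT (by name: the statement is the Claim_ definition above) =====
theorem films_compatibles_spec : Claim_equal_films_compatibles := by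
  intro movies history _ _
  unfold Spec_films_compatibles films_compatibles films_compatibles_alt
  rw [foldl_filter_eq_filter_all]
  rw [show (fun result movie => if pvCheckA movie history then result ++ [movie] else result)
        = (fun (result : List (List (String × String))) movie =>
            if (fun m => history.all (fun p => m.lookup p.1 == some p.2)) movie
            then result ++ [movie] else result)
      from by funext r mv; rw [pvCheckA_eq_all]]
  exact PySem.List.foldl_append_if_eq_filter _ _ _
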